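-- pv_equiv track=rewrite | github.com/lucasfijen/advent_of_code_2023 | day_16.py | odd_step
-- ===== SOURCE A (Python) =====
-- def straight_step(dir, loc):
--     match dir:
--         case 'v':
--             return (loc[0]+1, loc[1])
--         case '^':
--             return (loc[0]-1, loc[1])
--         case '>':
--             return (loc[0], loc[1]+1)
--         case '<':
--             return (loc[0], loc[1]-1)
--
-- def odd_step(dir, loc, current):
--     steps = ['<', '^', 'v', '>']
--     result = []
--     match current:
--         case '/':
--             match dir:
--                 case '<':
--                     result.append('v')
--                 case '^':
--                     result.append('>')
--                 case '>':
--                     result.append('^')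
--                 case 'v':
--                     result.append('<')
--         case '\\':
--             match dir:
--                 case '<':
--                     result.append('^')
--                 case '^':
--                     result.append('<')
--                 case '>':
--                     result.append('v')
--                 case 'v':
--                     result.append('>')
--
--         case '|':
--             match dir:
--                 case '<' | '>':
--                     result.extend(['^', 'v'])
--                 case _:
--                     result.append(dir)
--
--         case '-':
--             match dir:
--                 case '^' | 'v':
--                     result.extend(['<', '>'])
--                 case _:
--                     result.append(dir)
--
--     return [(straight_step(i, loc), i) for i in result]
-- ===== SOURCE B (Python) =====
-- def odd_step(dir, loc, current):
--     # Generate-and-filter: enumerate every candidate outgoing direction and keep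
--     # those that satisfy the cell's physical rule, instead of case-dispatching.
--     delta = {'<': (0, -1), '^': (-1, 0), 'v': (1, 0), '>': (0, 1)}
--     if dir not in delta or current not in ('/', '\\', '|', '-'):
--         return []
--     dr, dc = delta[dir]
--     out = []
--     for o, (er, ec) in delta.items():
--         ok = (current == '/' and (er, ec) == (-dc, -dr)) \
--           or (current == '\\' and (er, ec) == (dc, dr)) \
--           or (current == '|' and (ec == 0 if dc != 0 else o == dir)) \
--           or (current == '-' and (er == 0 if dr != 0 else o == dir))
--         if ok:
--             out.append(((loc[0] + er, loc[1] + ec), o))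
--     return out
-- ===== Notes on version B (the rewrite author's own statement) =====
-- stated objective: alternative
-- what changed: B is generate-and-filter: it loops over all four candidate outgoing directions and emits each one that satisfies the cell's physical rule (a reflection/split validity predicate over direction vectors), instead of A's nested per-character case dispatch that constructs the output list directly and then maps straight_step over it.
-- outside the precondition, e.g. on odd_step('x', (0, 0), '|'): A returns [(None, 'x')], B returns []
import Mathlib
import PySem

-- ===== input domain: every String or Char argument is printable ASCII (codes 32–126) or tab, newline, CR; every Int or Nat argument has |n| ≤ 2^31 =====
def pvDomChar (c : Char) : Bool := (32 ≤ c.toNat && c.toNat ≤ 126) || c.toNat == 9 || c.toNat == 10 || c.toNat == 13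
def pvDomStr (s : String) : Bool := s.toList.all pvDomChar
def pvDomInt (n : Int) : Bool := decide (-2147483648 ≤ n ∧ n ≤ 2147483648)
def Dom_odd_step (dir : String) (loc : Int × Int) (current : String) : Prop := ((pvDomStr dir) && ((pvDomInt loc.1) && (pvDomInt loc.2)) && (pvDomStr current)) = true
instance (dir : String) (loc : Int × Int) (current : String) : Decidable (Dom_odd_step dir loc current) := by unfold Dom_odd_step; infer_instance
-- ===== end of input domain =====

-- B replaces A's nested case dispatch by generate-and-filter: it enumerates all four
-- candidate outgoing directions and keeps those satisfying the cell's physical rule.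

-- ===== PORT A =====
-- Python's straight_step returns None on an unrecognized direction; that can only be
-- observed outside Pre_odd_step, so the port returns an Option and odd_step defaults it
-- to (0,0) — never reached under Pre_.
def straight_step (dir : String) (loc : Int × Int) : Option (Int × Int) :=
  if dir = "v" then some (loc.1 + 1, loc.2)
  else if dir = "^" then some (loc.1 - 1, loc.2)
  else if dir = ">" then some (loc.1, loc.2 + 1)
  else if dir = "<" then some (loc.1, loc.2 - 1)
  else none

def odd_step (dir : String) (loc : Int × Int) (current : String) : List ((Int × Int) × String) :=
  let result : List String :=
    if current = "/" then
      if dir = "<" then ["v"]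
      else if dir = "^" then [">"]
      else if dir = ">" then ["^"]
      else if dir = "v" then ["<"]
      else []
    else if current = "\\" then
      if dir = "<" then ["^"]
      else if dir = "^" then ["<"]
      else if dir = ">" then ["v"]
      else if dir = "v" then [">"]
      else []
    else if current = "|" then
      if dir = "<" ∨ dir = ">" then ["^", "v"] else [dir]
    else if current = "-" then
      if dir = "^" ∨ dir = "v" then ["<", ">"] else [dir]
    else []
  result.map (fun i => ((straight_step i loc).getD (0, 0), i))

-- ===== PORT B =====
-- delta = {'<': (0, -1), '^': (-1, 0), 'v': (1, 0), '>': (0, 1)}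
def pvDelta : PySem.Dict String (Int × Int) :=
  PySem.Dict.ofList [("<", (0, -1)), ("^", (-1, 0)), ("v", (1, 0)), (">", (0, 1))]

def odd_step_alt (dir : String) (loc : Int × Int) (current : String) : List ((Int × Int) × String) :=
  match PySem.Dict.get? pvDelta dir with
  | none => []
  | some d =>
    if current = "/" ∨ current = "\\" ∨ current = "|" ∨ current = "-" then
      -- for o, (er, ec) in delta.items(): append when the validity predicate holds
      (PySem.Dict.items pvDelta).foldl (fun out oe =>
        let o := oe.1
        let er := oe.2.1
        let ec := oe.2.2
        let ok :=
          (current = "/" ∧ (er, ec) = (-d.2, -d.1)) ∨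
          (current = "\\" ∧ (er, ec) = (d.2, d.1)) ∨
          (current = "|" ∧ (if d.2 ≠ 0 then ec = 0 else o = dir)) ∨
          (current = "-" ∧ (if d.1 ≠ 0 then er = 0 else o = dir))
        if ok then out ++ [((loc.1 + er, loc.2 + ec), o)] else out) []
    else []

-- ===== PRECONDITION & SPEC =====
-- Pre_ excludes the inputs where A returns a pair containing None (not a value of the
-- declared type): a splitter cell ('|' or '-') with an unrecognized direction string.
def Pre_odd_step (dir : String) (loc : Int × Int) (current : String) : Prop :=
  dir = "<" ∨ dir = "^" ∨ dir = "v" ∨ dir = ">" ∨ (current ≠ "|" ∧ current ≠ "-")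
instance (dir : String) (loc : Int × Int) (current : String) : Decidable (Pre_odd_step dir loc current) := by unfold Pre_odd_step; infer_instance
def pvWitness_odd_step : String × (Int × Int) × String := ("<", (2, 3), "/")

def Spec_odd_step (dir : String) (loc : Int × Int) (current : String) (out : List ((Int × Int) × String)) : Prop := out = odd_step_alt dir loc current
instance (dir : String) (loc : Int × Int) (current : String) (out : List ((Int × Int) × String)) : Decidable (Spec_odd_step dir loc current out) := by unfold Spec_odd_step; infer_instance

-- ===== CLAIM (what is proved, stated in full; the proofs are below) =====
def Claim_equal_odd_step : Prop := ∀ (dir : String) (loc : Int × Int) (current : String), Dom_odd_step dir loc current → Pre_odd_step dir loc current → Spec_odd_step dir loc current (odd_step dir loc current)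

-- ===== LEMMAS AND PROOFS =====
theorem get?_pvDelta_none (dir : String) (h1 : dir ≠ "<") (h2 : dir ≠ "^")
    (h3 : dir ≠ "v") (h4 : dir ≠ ">") : PySem.Dict.get? pvDelta dir = none := by
  simp [pvDelta, PySem.Dict.get?, PySem.Dict.ofList, PySem.Dict.update, PySem.Dict.empty,
    PySem.Dict.insert, PySem.Dict.contains, List.foldl, List.find?, beq_iff_eq]
  repeat' (split <;> simp_all)

theorem items_pvDelta : PySem.Dict.items pvDelta = [("<", ((0:Int), (-1:Int))), ("^", (-1, 0)), ("v", (1, 0)), (">", (0, 1))] := by rfl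
theorem get?_lt : pvDelta.get? "<" = some (0, -1) := by rfl
theorem get?_up : pvDelta.get? "^" = some (-1, 0) := by rfl
theorem get?_dn : pvDelta.get? "v" = some (1, 0) := by rfl
theorem get?_gt : pvDelta.get? ">" = some (0, 1) := by rfl

set_option maxRecDepth 8000 in
theorem odd_step_eq_alt (dir : String) (loc : Int × Int) (current : String)
    (hpre : Pre_odd_step dir loc current) : odd_step dir loc current = odd_step_alt dir loc current := by
  rcases hpre with h | h | h | h | ⟨hb, hm⟩
  · subst h
    by_cases c1 : current = "/" <;> by_cases c2 : current = "\\" <;>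
      by_cases c3 : current = "|" <;> by_cases c4 : current = "-" <;>
      simp_all [odd_step, odd_step_alt, straight_step, items_pvDelta, get?_lt, get?_up, get?_dn,
        get?_gt, List.foldl] <;> omega
  · subst h
    by_cases c1 : current = "/" <;> by_cases c2 : current = "\\" <;>
      by_cases c3 : current = "|" <;> by_cases c4 : current = "-" <;>
      simp_all [odd_step, odd_step_alt, straight_step, items_pvDelta, get?_lt, get?_up, get?_dn,
        get?_gt, List.foldl] <;> omega
  · subst h
    by_cases c1 : current = "/" <;> by_cases c2 : current = "\\" <;>
      by_cases c3 : current = "|" <;> by_cases c4 : current = "-" <;>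
      simp_all [odd_step, odd_step_alt, straight_step, items_pvDelta, get?_lt, get?_up, get?_dn,
        get?_gt, List.foldl] <;> omega
  · subst h
    by_cases c1 : current = "/" <;> by_cases c2 : current = "\\" <;>
      by_cases c3 : current = "|" <;> by_cases c4 : current = "-" <;>
      simp_all [odd_step, odd_step_alt, straight_step, items_pvDelta, get?_lt, get?_up, get?_dn,
        get?_gt, List.foldl] <;> omega
  · by_cases h1 : dir = "<" <;> by_cases h2 : dir = "^" <;>
      by_cases h3 : dir = "v" <;> by_cases h4 : dir = ">"
    all_goals first
      | (subst_vars
         by_cases c1 : current = "/" <;> by_cases c2 : current = "\\" <;>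
           simp [odd_step, odd_step_alt, straight_step, items_pvDelta, get?_lt, get?_up,
             get?_dn, get?_gt, List.foldl, c1, c2, hb, hm] <;> omega
        )
      | (simp_all [odd_step, odd_step_alt, straight_step, get?_pvDelta_none dir h1 h2 h3 h4])

-- ===== VERDICT (by name: the statement is the Claim_ definition above) =====
theorem odd_step_spec : Claim_equal_odd_step := by
  intro dir loc current _ hpre
  exact odd_step_eq_alt dir loc current hpre
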